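-- pv_equiv track=rewrite | github.com/HanNayeoniee/coding-test-study | programmers/level1/옹알이2.py | solution
-- ===== SOURCE A (Python) =====
-- def solution(babbling):
--     answer = 0
--     words = ["aya", "ye", "woo", "ma"]
--
--     for b in babbling:
--         prev = ""
--         while b:
--             if b[:2] in words and prev != b[:2]:
--                 prev = b[:2]
--                 b = b[2:]
--             elif b[:3] in words and prev != b[:3]:
--                 prev = b[:3]
--                 b = b[3:]
--             else:
--                 break
--         if b == "":
--             answer += 1
--     return answer
-- ===== SOURCE B (Python) =====
-- def _tokens(b):
--     # greedily extract maximal allowed-word tokens from the front; stop at junk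
--     toks = []
--     while b:
--         for w in ("aya", "ye", "woo", "ma"):
--             if b.startswith(w):
--                 toks.append(w)
--                 b = b[len(w):]
--                 break
--         else:
--             break
--     return toks
--
--
-- def solution(babbling):
--     def ok(b):
--         toks = _tokens(b)
--         return ''.join(toks) == b and all(x != y for x, y in zip(toks, toks[1:]))
--     return sum(1 for b in babbling if ok(b))
-- ===== Notes on version B (the rewrite author's own statement) =====
-- stated objective: alternative
-- what changed: B tokenizes each string into its full allowed-word list first and then verifies separately that the tokens tile the whole string and that no two adjacent tokens are equal, instead of A's interleaved consume-while-threading-prev loop that aborts mid-scan.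
import Mathlib
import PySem

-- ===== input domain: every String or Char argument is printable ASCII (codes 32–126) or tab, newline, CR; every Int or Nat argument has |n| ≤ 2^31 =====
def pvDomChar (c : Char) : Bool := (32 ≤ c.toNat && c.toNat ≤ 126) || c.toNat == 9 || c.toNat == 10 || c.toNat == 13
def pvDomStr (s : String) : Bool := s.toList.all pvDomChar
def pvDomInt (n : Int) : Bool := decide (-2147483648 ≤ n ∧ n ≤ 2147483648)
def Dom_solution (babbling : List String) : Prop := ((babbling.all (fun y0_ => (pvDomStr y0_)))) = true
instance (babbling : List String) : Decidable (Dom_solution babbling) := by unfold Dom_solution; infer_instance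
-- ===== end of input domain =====

-- B separates tokenization from validation (extract the full token list, then check that it
-- tiles the string and has no equal adjacent tokens), instead of A's interleaved
-- consume-while-threading-prev loop; same cost, alternative decomposition.

-- ===== PORT A =====
def wordsA : List (List Char) := [['a','y','a'], ['y','e'], ['w','o','o'], ['m','a']]

-- Python's `while b:` loop of A: b[:2]/b[:3] membership tests with the prev guard, slicing b down.
def loopA (b prev : List Char) : List Char :=
  if hb : b = [] then b
  else if b.take 2 ∈ wordsA ∧ prev ≠ b.take 2 then loopA (b.drop 2) (b.take 2)
  else if b.take 3 ∈ wordsA ∧ prev ≠ b.take 3 then loopA (b.drop 3) (b.take 3)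
  else b
termination_by b.length
decreasing_by
  all_goals
    (have hpos : 0 < b.length := List.length_pos_iff.mpr hb
     simp [List.length_drop]; omega)

def solution (babbling : List String) : Int :=
  babbling.foldl (fun answer b => if loopA b.toList [] = [] then answer + 1 else answer) 0

-- ===== PORT B =====  (shares the literal word list wordsA: both Pythons spell the same constant)
-- B's inner `for w in ... if b.startswith(w): ... break / else:` word search.
def tryWord (b : List Char) : List (List Char) → Option (List Char)
  | [] => none
  | w :: ws => if w.isPrefixOf b then some w else tryWord b ws

-- termination helper for `toks` (cited by name in decreasing_by)
theorem tryWord_some_mem : ∀ (ws : List (List Char)) (b w : List Char),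
    tryWord b ws = some w → w ∈ ws ∧ w <+: b := by
  intro ws
  induction ws with
  | nil => intro b w h; simp [tryWord] at h
  | cons u us ih =>
    intro b w h
    by_cases hu : u.isPrefixOf b
    · simp [tryWord, hu] at h
      subst h
      exact ⟨List.mem_cons_self, List.isPrefixOf_iff_prefix.mp hu⟩
    · simp [tryWord, hu] at h
      rcases ih b w h with ⟨h1, h2⟩
      exact ⟨List.mem_cons_of_mem _ h1, h2⟩

-- B's `_tokens` while-loop: extract tokens greedily, stop at junk.
def toks (b : List Char) : List (List Char) :=
  if hb : b = [] then []
  else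
    match htw : tryWord b wordsA with
    | some w => w :: toks (b.drop w.length)
    | none => []
termination_by b.length
decreasing_by
  have hpos : 0 < b.length := List.length_pos_iff.mpr hb
  have hw := (tryWord_some_mem wordsA b w htw).1
  simp [wordsA] at hw
  rcases hw with rfl | rfl | rfl | rfl <;> simp [List.length_drop] <;> omega

-- B's `all(x != y for x, y in zip(toks, toks[1:]))`
def noAdj (ts : List (List Char)) : Bool :=
  (ts.zip (ts.drop 1)).all (fun p => p.1 != p.2)

-- B's `ok`: ''.join(toks) == b and adjacency check
def okB (b : List Char) : Bool :=
  ((toks b).flatten == b) && noAdj (toks b)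

-- B's `sum(1 for b in babbling if ok(b))`
def solution_alt (babbling : List String) : Int :=
  ((babbling.countP (fun b => okB b.toList) : Nat) : Int)

-- ===== PRECONDITION & SPEC =====
def Spec_solution (babbling : List String) (out : Int) : Prop := out = solution_alt babbling
instance (babbling : List String) (out : Int) : Decidable (Spec_solution babbling out) := by unfold Spec_solution; infer_instance

-- ===== CLAIM (what is proved, stated in full; the proofs are below) =====
def Claim_equal_solution : Prop := ∀ (babbling : List String), Dom_solution babbling → Spec_solution babbling (solution babbling)

-- ===== LEMMAS AND PROOFS =====

-- prev-threaded adjacency condition characterising A's loop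
def Chain : List Char → List (List Char) → Prop
  | _, [] => True
  | prev, t :: ts => prev ≠ t ∧ Chain t ts

theorem tryWord_none_not_prefix : ∀ (ws : List (List Char)) (b : List Char),
    tryWord b ws = none → ∀ w ∈ ws, ¬ w <+: b := by
  intro ws
  induction ws with
  | nil => intro b _ w hw; simp at hw
  | cons u us ih =>
    intro b h w hw
    by_cases hu : u.isPrefixOf b
    · simp [tryWord, hu] at h
    · simp [tryWord, hu] at h
      rcases List.mem_cons.mp hw with rfl | hw'
      · exact fun hp => hu (List.isPrefixOf_iff_prefix.mpr hp)
      · exact ih b h w hw'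

theorem wordsA_excl (b w1 w2 : List Char) (h1 : w1 ∈ wordsA) (h2 : w2 ∈ wordsA)
    (p1 : w1 <+: b) (p2 : w2 <+: b) : w1 = w2 := by
  have hcmp := List.prefix_or_prefix_of_prefix p1 p2
  have key : ∀ u ∈ wordsA, ∀ v ∈ wordsA, u <+: v → u = v := by decide
  rcases hcmp with h | h
  · exact key w1 h1 w2 h2 h
  · exact (key w2 h2 w1 h1 h).symm

theorem take_mem_wordsA_2 (b : List Char) :
    b.take 2 ∈ wordsA ↔ (['y','e'] <+: b ∨ ['m','a'] <+: b) := by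
  constructor
  · intro h
    simp [wordsA] at h
    rcases h with h | h | h | h
    · have := congrArg List.length h; simp [List.length_take] at this; omega
    · left; rw [← h]; exact List.take_prefix 2 b
    · have := congrArg List.length h; simp [List.length_take] at this; omega
    · right; rw [← h]; exact List.take_prefix 2 b
  · intro h
    rcases h with h | h <;>
      (have ht := List.prefix_iff_eq_take.mp h; simp at ht; simp [wordsA, ← ht])

theorem take_mem_wordsA_3 (b : List Char) :
    b.take 3 ∈ wordsA ↔
      (['a','y','a'] <+: b ∨ ['w','o','o'] <+: b ∨ ['y','e'] = b ∨ ['m','a'] = b) := by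
  constructor
  · intro h
    simp [wordsA] at h
    rcases h with h | h | h | h
    · left; rw [← h]; exact List.take_prefix 3 b
    · have hlen := congrArg List.length h
      simp [List.length_take] at hlen
      have hall : b.take 3 = b := List.take_of_length_le (by omega)
      right; right; left; rw [← hall, h]
    · right; left; rw [← h]; exact List.take_prefix 3 b
    · have hlen := congrArg List.length h
      simp [List.length_take] at hlen
      have hall : b.take 3 = b := List.take_of_length_le (by omega)
      right; right; right; rw [← hall, h]
  · intro h
    rcases h with h | h | h | h
    · have ht := List.prefix_iff_eq_take.mp h; simp at ht; simp [wordsA, ← ht]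
    · have ht := List.prefix_iff_eq_take.mp h; simp at ht; simp [wordsA, ← ht]
    · rw [← h]; decide
    · rw [← h]; decide

theorem append_eq_iff_drop {w b : List Char} (h : w <+: b) (x : List Char) :
    w ++ x = b ↔ x = b.drop w.length := by
  rcases h with ⟨r, rfl⟩
  simp

theorem toks_none {b : List Char} (h : tryWord b wordsA = none) : toks b = [] := by
  rw [toks]
  split
  · rfl
  · split
    next heq => rw [h] at heq; cases heq
    next => rfl

theorem toks_some {b w : List Char} (h : tryWord b wordsA = some w) :
    toks b = w :: toks (b.drop w.length) := by
  rw [toks]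
  split
  next hb =>
    subst hb
    have hnone : tryWord ([] : List Char) wordsA = none := by decide
    rw [hnone] at h; cases h
  next hb =>
    split
    next w' heq =>
      rw [h] at heq
      injection heq with e
      subst e
      rfl
    next heq => rw [h] at heq; cases heq

-- main invariant: A's loop empties the string iff B's token list tiles it and prev-chains
theorem key_invariant : ∀ (n : Nat) (b prev : List Char), b.length ≤ n →
    (loopA b prev = [] ↔ ((toks b).flatten = b ∧ Chain prev (toks b))) := by
  intro n
  induction n with
  | zero =>
    intro b prev hlen
    have hb : b = [] := by cases b <;> simp_all
    subst hb
    rw [loopA, toks]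
    simp [Chain]
  | succ n ih =>
    intro b prev hlen
    by_cases hb : b = []
    · subst hb
      rw [loopA, toks]
      simp [Chain]
    · have hpos : 0 < b.length := List.length_pos_iff.mpr hb
      cases htw : tryWord b wordsA with
      | none =>
        have hnp := tryWord_none_not_prefix wordsA b htw
        have hA2 : b.take 2 ∉ wordsA := by
          rw [take_mem_wordsA_2]
          rintro (h | h)
          · exact hnp ['y','e'] (by decide) h
          · exact hnp ['m','a'] (by decide) h
        have hA3 : b.take 3 ∉ wordsA := by
          rw [take_mem_wordsA_3]
          rintro (h | h | h | h)
          · exact hnp ['a','y','a'] (by decide) h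
          · exact hnp ['w','o','o'] (by decide) h
          · exact hnp ['y','e'] (by decide) (h ▸ List.prefix_refl _)
          · exact hnp ['m','a'] (by decide) (h ▸ List.prefix_refl _)
        rw [toks_none htw, loopA]
        simp only [dif_neg hb]
        rw [if_neg (by simp [hA2]), if_neg (by simp [hA3])]
        simp [Chain, hb, eq_comm]
      | some w =>
        rcases tryWord_some_mem wordsA b w htw with ⟨hmem, hpre⟩
        have hex : ∀ v ∈ wordsA, v <+: b → v = w := fun v hv hp =>
          wordsA_excl b v w hv hmem hp hpre
        simp [wordsA] at hmem
        rcases hmem with rfl | rfl | rfl | rfl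
        · -- w = "aya" (length 3): A takes its second branch
          have ht3 : b.take 3 = ['a','y','a'] := by
            simpa using (List.prefix_iff_eq_take.mp hpre).symm
          have htoks : toks b = ['a','y','a'] :: toks (b.drop 3) := by
            simpa using toks_some htw
          have hcan : ∀ x, 'a'::'y'::'a'::x = b ↔ x = b.drop 3 := by
            simpa using append_eq_iff_drop hpre
          have hA2 : b.take 2 ∉ wordsA := by
            rw [take_mem_wordsA_2]
            rintro (h | h)
            · exact absurd (hex _ (by decide) h) (by decide)
            · exact absurd (hex _ (by decide) h) (by decide)
          rw [htoks, loopA]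
          simp only [dif_neg hb]
          rw [if_neg (by simp [hA2])]
          by_cases hp : prev = ['a','y','a']
          · rw [if_neg (by rw [ht3]; simp [hp])]
            simp [Chain, hp, hb]
          · rw [if_pos ⟨by rw [ht3]; decide, by rw [ht3]; exact hp⟩, ht3]
            rw [ih (b.drop 3) ['a','y','a'] (by simp [List.length_drop]; omega)]
            simp [Chain, hp, hcan]
        · -- w = "ye" (length 2): A takes its first branch
          have ht2 : b.take 2 = ['y','e'] := by
            simpa using (List.prefix_iff_eq_take.mp hpre).symm
          have htoks : toks b = ['y','e'] :: toks (b.drop 2) := by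
            simpa using toks_some htw
          have hcan : ∀ x, 'y'::'e'::x = b ↔ x = b.drop 2 := by
            simpa using append_eq_iff_drop hpre
          rw [htoks, loopA]
          simp only [dif_neg hb]
          by_cases hp : prev = ['y','e']
          · rw [if_neg (by rw [ht2]; simp [hp]), if_neg ?_]
            · simp [Chain, hp, hb]
            · rintro ⟨h3, hne⟩
              rcases (take_mem_wordsA_3 b).mp h3 with h | h | h | h
              · exact absurd (hex _ (by decide) h) (by decide)
              · exact absurd (hex _ (by decide) h) (by decide)
              · subst h; exact hne (by rw [hp]; decide)
              · exact absurd (hex ['m','a'] (by decide) (by rw [← h])) (by decide)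
          · rw [if_pos ⟨by rw [ht2]; decide, by rw [ht2]; exact hp⟩, ht2]
            rw [ih (b.drop 2) ['y','e'] (by simp [List.length_drop]; omega)]
            simp [Chain, hp, hcan]
        · -- w = "woo" (length 3)
          have ht3 : b.take 3 = ['w','o','o'] := by
            simpa using (List.prefix_iff_eq_take.mp hpre).symm
          have htoks : toks b = ['w','o','o'] :: toks (b.drop 3) := by
            simpa using toks_some htw
          have hcan : ∀ x, 'w'::'o'::'o'::x = b ↔ x = b.drop 3 := by
            simpa using append_eq_iff_drop hpre
          have hA2 : b.take 2 ∉ wordsA := by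
            rw [take_mem_wordsA_2]
            rintro (h | h)
            · exact absurd (hex _ (by decide) h) (by decide)
            · exact absurd (hex _ (by decide) h) (by decide)
          rw [htoks, loopA]
          simp only [dif_neg hb]
          rw [if_neg (by simp [hA2])]
          by_cases hp : prev = ['w','o','o']
          · rw [if_neg (by rw [ht3]; simp [hp])]
            simp [Chain, hp, hb]
          · rw [if_pos ⟨by rw [ht3]; decide, by rw [ht3]; exact hp⟩, ht3]
            rw [ih (b.drop 3) ['w','o','o'] (by simp [List.length_drop]; omega)]
            simp [Chain, hp, hcan]
        · -- w = "ma" (length 2)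
          have ht2 : b.take 2 = ['m','a'] := by
            simpa using (List.prefix_iff_eq_take.mp hpre).symm
          have htoks : toks b = ['m','a'] :: toks (b.drop 2) := by
            simpa using toks_some htw
          have hcan : ∀ x, 'm'::'a'::x = b ↔ x = b.drop 2 := by
            simpa using append_eq_iff_drop hpre
          rw [htoks, loopA]
          simp only [dif_neg hb]
          by_cases hp : prev = ['m','a']
          · rw [if_neg (by rw [ht2]; simp [hp]), if_neg ?_]
            · simp [Chain, hp, hb]
            · rintro ⟨h3, hne⟩
              rcases (take_mem_wordsA_3 b).mp h3 with h | h | h | h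
              · exact absurd (hex _ (by decide) h) (by decide)
              · exact absurd (hex _ (by decide) h) (by decide)
              · exact absurd (hex ['y','e'] (by decide) (by rw [← h])) (by decide)
              · subst h; exact hne (by rw [hp]; decide)
          · rw [if_pos ⟨by rw [ht2]; decide, by rw [ht2]; exact hp⟩, ht2]
            rw [ih (b.drop 2) ['m','a'] (by simp [List.length_drop]; omega)]
            simp [Chain, hp, hcan]

theorem toks_subset : ∀ (n : Nat) (b : List Char), b.length ≤ n →
    ∀ t ∈ toks b, t ∈ wordsA := by
  intro n
  induction n with
  | zero =>
    intro b hlen t ht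
    have hb : b = [] := by cases b <;> simp_all
    subst hb; rw [toks] at ht; simp at ht
  | succ n ih =>
    intro b hlen t ht
    by_cases hb : b = []
    · subst hb; rw [toks] at ht; simp at ht
    · have hpos : 0 < b.length := List.length_pos_iff.mpr hb
      rw [toks] at ht
      simp only [dif_neg hb] at ht
      cases htw : tryWord b wordsA with
      | none => rw [htw] at ht; simp at ht
      | some w =>
        rw [htw] at ht
        rcases tryWord_some_mem wordsA b w htw with ⟨hmem, _⟩
        rcases List.mem_cons.mp ht with rfl | ht'
        · exact hmem
        · refine ih (b.drop w.length) ?_ t ht'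
          have hwlen : 0 < w.length := by
            simp [wordsA] at hmem
            rcases hmem with rfl | rfl | rfl | rfl <;> simp
          simp [List.length_drop]; omega

theorem zip_all_chain : ∀ (ts : List (List Char)) (x : List Char),
    ((((x :: ts).zip ((x :: ts).drop 1)).all (fun p => p.1 != p.2)) = true ↔ Chain x ts) := by
  intro ts
  induction ts with
  | nil => intro x; simp [Chain]
  | cons y r ih =>
    intro x
    simp only [List.drop_one, List.tail_cons, List.zip_cons_cons, List.all_cons]
    have := ih y
    simp only [List.drop_one, List.tail_cons] at this
    simp [Chain, this]

theorem okB_iff (b : List Char) :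
    okB b = true ↔ ((toks b).flatten = b ∧ Chain [] (toks b)) := by
  cases hts : toks b with
  | nil => simp [okB, noAdj, hts, Chain]
  | cons t ts =>
    have htmem : t ∈ wordsA :=
      toks_subset b.length b le_rfl t (by rw [hts]; exact List.mem_cons_self)
    have htne : ([] : List Char) ≠ t := by
      simp [wordsA] at htmem
      rcases htmem with rfl | rfl | rfl | rfl <;> simp
    have h := zip_all_chain ts t
    unfold okB noAdj
    rw [hts, Bool.and_eq_true, beq_iff_eq, h]
    simp [Chain, htne]

theorem cond_iff (b : List Char) : (loopA b [] = []) ↔ okB b = true := by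
  rw [okB_iff, key_invariant b.length b [] le_rfl]

theorem fold_count : ∀ (l : List String) (acc : Int),
    l.foldl (fun answer b => if loopA b.toList [] = [] then answer + 1 else answer) acc
      = acc + ((l.countP (fun b => okB b.toList) : Nat) : Int) := by
  intro l
  induction l with
  | nil => intro acc; simp
  | cons b l ih =>
    intro acc
    simp only [List.foldl_cons, List.countP_cons, ih]
    by_cases hc : okB b.toList = true
    · rw [if_pos ((cond_iff b.toList).mpr hc)]
      simp [hc]; ring
    · rw [if_neg (fun h => hc ((cond_iff b.toList).mp h))]
      simp [hc]

-- ===== VERDICT (by name: the statement is the Claim_ definition above) =====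
theorem solution_spec : Claim_equal_solution := by
  intro babbling _
  show solution babbling = solution_alt babbling
  unfold solution solution_alt
  rw [fold_count]
  simp
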